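-- pv_equiv track=rewrite | github.com/secureinfo42/urlgrep | urlgrep.py | unhtml_url
-- ===== SOURCE A (Python) =====
-- UGLY_SEPARATOR = [
--   '&quot;',
--   '&#039;',
--   '?',
--   '}',
--   '{',
--   ';',
--   "'",
--   '"',
-- ]
--
-- def unhtml_url(url,clean_mode=""):
--   if clean_mode == "all":
--     for key in UGLY_SEPARATOR:
--       if key in url:
--         url = url.split(key)[0]
--   if clean_mode == "punc":
--     for key in UGLY_SEPARATOR[2:]:
--       if key in url:
--         url = url.split(key)[0]
--   if clean_mode == "quote":
--     for key in UGLY_SEPARATOR[:2]: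
--       if key in url:
--         url = url.split(key)[0]
--   return(url)
-- ===== SOURCE B (Python) =====
-- UGLY_SEPARATOR = [
--   '&quot;',
--   '&#039;',
--   '?',
--   '}',
--   '{',
--   ';',
--   "'",
--   '"',
-- ]
--
-- def unhtml_url(url, clean_mode=""):
--     if clean_mode == "all":
--         seps = UGLY_SEPARATOR
--     elif clean_mode == "punc":
--         seps = UGLY_SEPARATOR[2:]
--     elif clean_mode == "quote":
--         seps = UGLY_SEPARATOR[:2]
--     else:
--         seps = []
--     positions = [p for p in (url.find(s) for s in seps) if p >= 0]
--     return url[:min(positions)] if positions else url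
-- ===== Notes on version B (the rewrite author's own statement) =====
-- stated objective: simpler
-- what changed: Instead of looping over the separators and repeatedly splitting/reassigning the url, B computes each separator's find() position once, takes the minimum occurring position and slices the url a single time (or returns it unchanged if no separator occurs).
import Mathlib
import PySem

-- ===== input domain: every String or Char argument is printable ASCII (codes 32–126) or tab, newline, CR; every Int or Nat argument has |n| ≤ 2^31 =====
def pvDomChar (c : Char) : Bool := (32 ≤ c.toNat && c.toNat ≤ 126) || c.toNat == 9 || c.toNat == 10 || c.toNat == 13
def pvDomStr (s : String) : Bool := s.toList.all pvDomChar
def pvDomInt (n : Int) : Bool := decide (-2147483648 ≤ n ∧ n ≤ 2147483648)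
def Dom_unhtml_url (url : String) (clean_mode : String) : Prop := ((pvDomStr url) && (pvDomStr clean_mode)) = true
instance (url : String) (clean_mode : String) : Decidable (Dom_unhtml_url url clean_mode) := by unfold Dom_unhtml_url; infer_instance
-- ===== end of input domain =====

-- B replaces A's loop of repeated split/reassign by computing each separator's find() position
-- once, slicing a single time at the minimum occurring position (objective: simpler).

-- ===== PORT A =====
-- UGLY_SEPARATOR module constant
def pvUGLY : List String := ["&quot;", "&#039;", "?", "}", "{", ";", "'", "\""]

-- one body of A's loop: `if key in url: url = url.split(key)[0]`.
-- every key is a nonempty literal, so `url.split(key)` is `Str.split? = some parts` with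
-- `parts` nonempty; hence `[0]` is ported as `(… .getD []).headD ""`.
def pvCutA (u key : String) : String :=
  if PySem.Str.isIn key u then ((PySem.Str.split? u key).getD []).headD "" else u

def unhtml_url (url : String) (clean_mode : String) : String :=
  let u1 := if clean_mode = "all" then pvUGLY.foldl pvCutA url else url
  let u2 := if clean_mode = "punc" then (PySem.List.slice pvUGLY (some 2) none).foldl pvCutA u1 else u1
  let u3 := if clean_mode = "quote" then (PySem.List.slice pvUGLY none (some 2)).foldl pvCutA u2 else u2
  u3

-- ===== PORT B =====
-- literal port of Source B: pick the separator subset, collect the find() positions ≥ 0,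
-- slice at their minimum (Python `min` on a nonempty list = PySem.List.min?; empty ⟺ none).
def unhtml_url_alt (url : String) (clean_mode : String) : String :=
  let seps : List String :=
    if clean_mode = "all" then pvUGLY
    else if clean_mode = "punc" then PySem.List.slice pvUGLY (some 2) none
    else if clean_mode = "quote" then PySem.List.slice pvUGLY none (some 2)
    else []
  let positions : List Int := (seps.map (fun s => PySem.Str.find url s)).filter (fun p => 0 ≤ p)
  match PySem.List.min? positions (fun p => p) with
  | some m => PySem.Str.slice url none (some m)
  | none => url

-- ===== PRECONDITION & SPEC =====
def Spec_unhtml_url (url : String) (clean_mode : String) (out : String) : Prop := out = unhtml_url_alt url clean_mode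
instance (url : String) (clean_mode : String) (out : String) : Decidable (Spec_unhtml_url url clean_mode out) := by unfold Spec_unhtml_url; infer_instance

-- ===== CLAIM (what is proved, stated in full; the proofs are below) =====
def Claim_equal_unhtml_url : Prop := ∀ (url : String) (clean_mode : String), Dom_unhtml_url url clean_mode → Spec_unhtml_url url clean_mode (unhtml_url url clean_mode)

-- ===== LEMMAS AND PROOFS =====

-- the canonical Char-level form of one loop body: truncate at the first occurrence, if any
def pvCutC (u k : List Char) : List Char :=
  if PySem.Chars.isIn k u then u.take (PySem.Chars.find u k).toNat else u

-- "an occurrence of a later separator never straddles an occurrence start of an earlier one"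
def pvCross (u k' k : List Char) : Prop :=
  ∀ p q, k' <+: u.drop p → k <+: u.drop q → q < p → q + k.length ≤ p

-- find.go with any start offset is find.go from 0, shifted
lemma pvFindGoShift (sub : List Char) : ∀ (l : List Char) (k : Nat),
    PySem.Chars.find.go sub l k =
      (if PySem.Chars.find.go sub l 0 = -1 then -1 else PySem.Chars.find.go sub l 0 + k) := by
  intro l
  induction l with
  | nil =>
    intro k
    rw [PySem.Chars.find.go, PySem.Chars.find.go]
    by_cases h : sub.isEmpty <;> simp [h]
  | cons c t ih =>
    intro k
    rw [PySem.Chars.find.go]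
    conv_rhs => rw [PySem.Chars.find.go]
    by_cases h : sub.isPrefixOf (c :: t)
    · rw [if_pos h, if_pos h]
      norm_num
    · rw [if_neg h, if_neg h]
      have hnn : -1 ≤ PySem.Chars.find.go sub t 0 := PySem.Chars.neg_one_le_find t sub
      rw [ih (k + 1), ih 1]
      by_cases h0 : PySem.Chars.find.go sub t 0 = -1
      · rw [if_pos h0, if_pos h0]
        norm_num
      · rw [if_neg h0, if_neg h0]
        split <;> omega

lemma pvFindCons (sep : List Char) (c : Char) (rest : List Char)
    (h : ¬ sep.isPrefixOf (c :: rest) = true) :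
    PySem.Chars.find (c :: rest) sep =
      (if PySem.Chars.find rest sep = -1 then -1 else PySem.Chars.find rest sep + 1) := by
  show PySem.Chars.find.go sep (c :: rest) 0 = _
  rw [PySem.Chars.find.go, if_neg h]
  exact pvFindGoShift sep rest 1

-- once a piece is on the accumulator, it is the head of the final (reversed) result
lemma pvGoHeadAcc (sep x : List Char) : ∀ (fuel : Nat) (l cur : List Char) (acc : List (List Char)),
    (PySem.Chars.splitOn.go sep fuel l cur (acc ++ [x])).headD [] = x := by
  intro fuel
  induction fuel with
  | zero =>
    intro l cur acc
    rw [PySem.Chars.splitOn.go]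
    simp
  | succ fuel ih =>
    intro l cur acc
    cases l with
    | nil =>
      rw [PySem.Chars.splitOn.go]
      simp
      all_goals omega
    | cons c rest =>
      rw [PySem.Chars.splitOn.go]
      by_cases h : sep.isPrefixOf (c :: rest)
      · rw [if_pos h]
        exact ih (List.drop sep.length (c :: rest)) [] (cur.reverse :: acc)
      · rw [if_neg h]
        exact ih rest (c :: cur) acc

-- with an empty accumulator, the head of splitOn.go is everything before the first match
lemma pvGoHead (sep : List Char) (hsep : sep ≠ []) : ∀ (fuel : Nat) (l cur : List Char),
    l.length < fuel →
    (PySem.Chars.splitOn.go sep fuel l cur []).headD [] =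
      cur.reverse ++ (if PySem.Chars.isIn sep l then l.take (PySem.Chars.find l sep).toNat else l) := by
  intro fuel
  induction fuel with
  | zero => intro l cur h; omega
  | succ fuel ih =>
    intro l cur hlen
    cases l with
    | nil =>
      rw [PySem.Chars.splitOn.go]
      have hfind : PySem.Chars.find ([] : List Char) sep = -1 := by
        show PySem.Chars.find.go sep [] 0 = -1
        rw [PySem.Chars.find.go]
        simp [List.isEmpty_iff, hsep]
      simp [PySem.Chars.isIn, hfind]
      all_goals omega
    | cons c rest =>
      rw [PySem.Chars.splitOn.go]
      by_cases h : sep.isPrefixOf (c :: rest)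
      · have hfind : PySem.Chars.find (c :: rest) sep = 0 := by
          show PySem.Chars.find.go sep (c :: rest) 0 = 0
          rw [PySem.Chars.find.go, if_pos h]
          simp
        have hhead := pvGoHeadAcc sep cur.reverse fuel (List.drop sep.length (c :: rest)) [] []
        simp only [List.nil_append] at hhead
        rw [if_pos h, hhead]
        simp [PySem.Chars.isIn, hfind]
      · have hrec := ih rest (c :: cur) (by simpa using Nat.lt_of_succ_lt_succ hlen)
        have hfind := pvFindCons sep c rest h
        rw [if_neg h, hrec]
        simp only [PySem.Chars.isIn]
        simp only [hfind]
        by_cases h0 : PySem.Chars.find rest sep = -1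
        · simp [h0]
        · have hge : 0 ≤ PySem.Chars.find rest sep := by
            have := PySem.Chars.neg_one_le_find rest sep; omega
          have h2 : ¬ (PySem.Chars.find rest sep + 1 = -1) := by omega
          have h3 : (PySem.Chars.find rest sep + 1).toNat = (PySem.Chars.find rest sep).toNat + 1 := by
            omega
          simp [h0, h2, h3, List.take_succ_cons, bne_iff_ne, List.append_assoc]


-- head of Python's str.split(sep) = everything before the first occurrence of sep
lemma pvSplitHead (u sep : List Char) (hsep : sep ≠ []) :
    (PySem.Chars.splitOn u sep).headD [] =
      (if PySem.Chars.isIn sep u then u.take (PySem.Chars.find u sep).toNat else u) := by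
  have := pvGoHead sep hsep (u.length + 1) u [] (by omega)
  simpa [PySem.Chars.splitOn] using this

-- occurrences inside a prefix u.take p are exactly occurrences of u that fit below p
lemma pvOccTake (u k : List Char) (p i : Nat) (hk : k ≠ []) :
    (k <+: (u.take p).drop i) ↔ (k <+: u.drop i ∧ i + k.length ≤ p) := by
  rw [List.drop_take, List.prefix_take_iff]
  have hk' : 0 < k.length := List.length_pos_iff.mpr hk
  constructor
  · rintro ⟨h1, h2⟩; exact ⟨h1, by omega⟩
  · rintro ⟨h1, h2⟩; exact ⟨h1, by omega⟩

lemma pvIsInTakeFalse (u k : List Char) (p : Nat) (hk : k ≠ [])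
    (h : ∀ i, k <+: u.drop i → i + k.length ≤ p → False) :
    PySem.Chars.isIn k (u.take p) = false := by
  by_contra hc
  have htrue : PySem.Chars.isIn k (u.take p) = true := by
    cases hh : PySem.Chars.isIn k (u.take p) <;> simp_all
  obtain ⟨j, hj⟩ := (PySem.Chars.exists_prefix_drop_iff_isIn k (u.take p)).mpr htrue
  obtain ⟨h1, h2⟩ := (pvOccTake u k p j hk).mp hj
  exact h j h1 h2

-- the crux: cutting a prefix u.take p at k equals cutting u at k, capped at p —
-- provided no occurrence of k below p straddles p
lemma pvCutTake (u k : List Char) (p : Nat) (hk : k ≠ [])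
    (hsafe : ∀ q, k <+: u.drop q → q < p → q + k.length ≤ p) :
    pvCutC (u.take p) k =
      u.take (if 0 ≤ PySem.Chars.find u k then min p (PySem.Chars.find u k).toNat else p) := by
  by_cases h0 : 0 ≤ PySem.Chars.find u k
  · obtain ⟨hocc, hmin⟩ := PySem.Chars.find_spec h0
    by_cases hlt : (PySem.Chars.find u k).toNat < p
    · -- the first occurrence fits inside the prefix
      have hfit : (PySem.Chars.find u k).toNat + k.length ≤ p := hsafe _ hocc hlt
      have hocc' : k <+: (u.take p).drop (PySem.Chars.find u k).toNat :=
        (pvOccTake u k p _ hk).mpr ⟨hocc, hfit⟩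
      have hisin : PySem.Chars.isIn k (u.take p) = true :=
        (PySem.Chars.exists_prefix_drop_iff_isIn k (u.take p)).mp ⟨_, hocc'⟩
      have h0' : 0 ≤ PySem.Chars.find (u.take p) k := by
        rw [PySem.Chars.find_nonneg_iff]
        exact (PySem.Chars.isIn_iff_infix k (u.take p)).mp hisin
      obtain ⟨hocc2, hmin2⟩ := PySem.Chars.find_spec h0'
      have heq : (PySem.Chars.find (u.take p) k).toNat = (PySem.Chars.find u k).toNat := by
        have hle1 : ¬ ((PySem.Chars.find (u.take p) k).toNat < (PySem.Chars.find u k).toNat) := by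
          intro hc
          exact hmin _ hc ((pvOccTake u k p _ hk).mp hocc2).1
        have hle2 : ¬ ((PySem.Chars.find u k).toNat < (PySem.Chars.find (u.take p) k).toNat) := by
          intro hc
          exact hmin2 _ hc hocc'
        omega
      unfold pvCutC
      rw [hisin]
      simp only [if_true, h0, List.take_take, heq]
      congr 1
      omega
    · -- first occurrence at or past p: nothing to cut in the prefix
      have hisin : PySem.Chars.isIn k (u.take p) = false := by
        apply pvIsInTakeFalse u k p hk
        intro i hi hfit
        by_cases hip : i < (PySem.Chars.find u k).toNat
        · exact hmin i hip hi
        · have hk' : 0 < k.length := List.length_pos_iff.mpr hk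
          omega
      unfold pvCutC
      rw [hisin]
      simp only [Bool.false_eq_true, if_false, h0, if_true]
      congr 1
      omega
  · -- k does not occur in u at all
    have hisin : PySem.Chars.isIn k (u.take p) = false := by
      apply pvIsInTakeFalse u k p hk
      intro i hi _
      have : PySem.Chars.isIn k u = true :=
        (PySem.Chars.exists_prefix_drop_iff_isIn k u).mp ⟨i, hi⟩
      have : 0 ≤ PySem.Chars.find u k :=
        (PySem.Chars.find_nonneg_iff u k).mpr ((PySem.Chars.isIn_iff_infix k u).mp this)
      exact h0 this
    unfold pvCutC
    rw [hisin]
    simp [h0]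

-- A's whole loop over the separators = one cut at the running minimum find position
lemma pvMain (u : List Char) : ∀ (K : List (List Char)) (p : Nat),
    (∀ k ∈ K, k ≠ []) →
    (∀ k ∈ K, ∀ q, k <+: u.drop q → q < p → q + k.length ≤ p) →
    List.Pairwise (pvCross u) K →
    K.foldl pvCutC (u.take p) =
      u.take ((((K.map (fun k => PySem.Chars.find u k)).filter (fun m => decide (0 ≤ m))).map Int.toNat).foldl min p) := by
  intro K
  induction K with
  | nil => intro p _ _ _; simp
  | cons k rest ih =>
    intro p hne hsafe hpw
    have hk : k ≠ [] := hne k (by simp)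
    have hcut := pvCutTake u k p hk (hsafe k (by simp))
    obtain ⟨hhead, htail⟩ := List.pairwise_cons.mp hpw
    simp only [List.foldl_cons, List.map_cons, List.filter_cons, hcut]
    by_cases h0 : 0 ≤ PySem.Chars.find u k
    · simp only [h0, decide_true, if_true, List.map_cons, List.foldl_cons]
      rw [ih (min p (PySem.Chars.find u k).toNat)
        (fun k2 hk2 => hne k2 (by simp [hk2]))
        ?_ htail]
      intro k2 hk2 q2 hpre2 hlt2
      by_cases hq : (PySem.Chars.find u k).toNat < p
      · have hmin : min p (PySem.Chars.find u k).toNat = (PySem.Chars.find u k).toNat := by omega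
        rw [hmin] at hlt2 ⊢
        exact hhead k2 hk2 _ q2 (PySem.Chars.find_spec h0).1 hpre2 hlt2
      · have hmin : min p (PySem.Chars.find u k).toNat = p := by omega
        rw [hmin] at hlt2 ⊢
        exact hsafe k2 (by simp [hk2]) q2 hpre2 hlt2
    · simp only [h0, decide_false, Bool.false_eq_true, if_false]
      exact ih p (fun k2 hk2 => hne k2 (by simp [hk2]))
        (fun k2 hk2 => hsafe k2 (by simp [hk2])) htail

-- bridging the String-level loop body of port A to the canonical Char-level cut
lemma pvCutAToList (u k : String) (hk : k.toList ≠ []) :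
    (pvCutA u k).toList = pvCutC u.toList k.toList := by
  unfold pvCutA pvCutC
  rw [PySem.Str.isIn_eq]
  by_cases h : PySem.Chars.isIn k.toList u.toList
  · simp only [h, if_true]
    rw [PySem.Str.split?]
    rw [PySem.Chars.split?]
    simp only [List.isEmpty_iff, hk, if_false]
    have hmap : ∀ (L : List (List Char)),
        ((L.map String.ofList).headD "").toList = L.headD [] := by
      intro L; cases L <;> simp
    rw [Option.map_some, Option.getD_some, hmap, pvSplitHead u.toList k.toList hk]
    simp [h]
  · simp [h]

lemma pvFoldAToList : ∀ (KS : List String) (u : String), (∀ k ∈ KS, k.toList ≠ []) →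
    (KS.foldl pvCutA u).toList = (KS.map String.toList).foldl pvCutC u.toList := by
  intro KS
  induction KS with
  | nil => intro u _; simp
  | cons k rest ih =>
    intro u hne
    simp only [List.foldl_cons, List.map_cons]
    rw [ih (pvCutA u k) (fun k2 hk2 => hne k2 (by simp [hk2])),
      pvCutAToList u k (hne k (by simp))]

-- folding min over the toNats of a list of nonnegative Ints = toNat of folding min
lemma pvToNatFold : ∀ (l : List Int) (a : Int), 0 ≤ a → (∀ y ∈ l, 0 ≤ y) →
    (l.map Int.toNat).foldl min a.toNat = (l.foldl min a).toNat := by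
  intro l
  induction l with
  | nil => intro a _ _; simp
  | cons x xs ih =>
    intro a ha h0
    have hx : 0 ≤ x := h0 x (by simp)
    have hmin : (min a x).toNat = min a.toNat x.toNat := by omega
    simp only [List.map_cons, List.foldl_cons, ← hmin]
    exact ih (min a x) (by omega) (fun y hy => h0 y (by simp [hy]))

-- a later separator of length 1 can never straddle anything
lemma pvCrossOne (u k' k : List Char) (h : k.length = 1) : pvCross u k' k := by
  intro p q _ _ hlt
  omega

-- '&#039;' cannot start strictly inside an occurrence of '&quot;' (no interior '&')
lemma pvCrossAmp (u : List Char) : pvCross u "&quot;".toList "&#039;".toList := by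
  have hq : "&quot;".toList = ['&', 'q', 'u', 'o', 't', ';'] := by decide
  have ha : "&#039;".toList = ['&', '#', '0', '3', '9', ';'] := by decide
  rw [hq, ha]
  intro p q h1 h2 hlt
  simp only [List.length_cons, List.length_nil]
  by_contra hc
  have hc6 : p < q + 6 := by omega
  obtain ⟨t1, ht1⟩ := h1
  obtain ⟨t2, ht2⟩ := h2
  have hp : u[p + 0]? = some '&' := by
    rw [← List.getElem?_drop, ← ht1]
    rfl
  rw [Nat.add_zero] at hp
  have hd : u[q + (p - q)]? = ((['&', '#', '0', '3', '9', ';'] : List Char) ++ t2)[p - q]? := by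
    rw [← List.getElem?_drop, ← ht2]
  have hq6 : p - q < (['&', '#', '0', '3', '9', ';'] : List Char).length := by
    simp only [List.length_cons, List.length_nil]
    omega
  rw [List.getElem?_append_left hq6] at hd
  have hqp : q + (p - q) = p := by omega
  rw [hqp, hp] at hd
  have hge : 1 ≤ p - q := by omega
  have hle : p - q ≤ 5 := by omega
  set d := p - q with hdq
  interval_cases d <;> simp at hd

-- a list of separators all of length 1 is pairwise safe
lemma pvPWOnes (u : List Char) : ∀ (l : List (List Char)), (∀ k ∈ l, k.length = 1) →
    List.Pairwise (pvCross u) l := by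
  intro l
  induction l with
  | nil => intro _; exact List.Pairwise.nil
  | cons a rest ih =>
    intro h
    exact List.Pairwise.cons
      (fun b hb => pvCrossOne u a b (h b (by simp [hb])))
      (ih (fun k hk => h k (by simp [hk])))

-- the String-level statement of the whole equivalence, for one separator list
lemma pvModeEq (u : String) (K : List String)
    (hne : ∀ k ∈ K, k.toList ≠ [])
    (hpw : List.Pairwise (pvCross u.toList) (K.map String.toList)) :
    K.foldl pvCutA u =
      (match PySem.List.min? ((K.map (fun s => PySem.Str.find u s)).filter (fun p => 0 ≤ p)) (fun p => p) with
        | some m => PySem.Str.slice u none (some m)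
        | none => u) := by
  have hmaps : (K.map (fun s => PySem.Str.find u s)) =
      ((K.map String.toList).map (fun k => PySem.Chars.find u.toList k)) := by
    simp [PySem.Str.find_eq, List.map_map, Function.comp]
  have hmem : ∀ m ∈ (K.map (fun s => PySem.Str.find u s)).filter (fun p => 0 ≤ p),
      0 ≤ m ∧ m ≤ (u.toList.length : Int) := by
    intro m hm
    have hm' := List.mem_filter.mp hm
    obtain ⟨s, _, hs⟩ := List.mem_map.mp hm'.1
    refine ⟨by simpa using hm'.2, ?_⟩
    rw [← hs, PySem.Str.find_eq]
    exact PySem.Chars.find_le_length u.toList s.toList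
  have hne' : ∀ k ∈ K.map String.toList, k ≠ [] := by
    intro k hk
    obtain ⟨s, hs, hsk⟩ := List.mem_map.mp hk
    rw [← hsk]
    exact hne s hs
  have hL : (K.foldl pvCutA u).toList =
      u.toList.take (((((K.map String.toList).map (fun k => PySem.Chars.find u.toList k)).filter
        (fun m => decide (0 ≤ m))).map Int.toNat).foldl min u.toList.length) := by
    rw [pvFoldAToList K u hne]
    conv_lhs => rw [show u.toList = u.toList.take u.toList.length from (List.take_length).symm]
    refine pvMain u.toList (K.map String.toList) u.toList.length hne' ?_ hpw
    intro k hk q hpre hlt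
    have h1 : k.length ≤ (u.toList.drop q).length := hpre.length_le
    rw [List.length_drop] at h1
    omega
  rw [← String.toList_inj]
  rw [hL, ← hmaps]
  cases hP : (K.map (fun s => PySem.Str.find u s)).filter (fun p => 0 ≤ p) with
  | nil =>
    have : PySem.List.min? ([] : List Int) (fun p => p) = none := rfl
    simp [this]
  | cons x xs =>
    rw [PySem.List.min?_id_cons]
    have hx : 0 ≤ x ∧ x ≤ (u.toList.length : Int) := hmem x (by rw [hP]; simp)
    have hm : 0 ≤ xs.foldl min x ∧ xs.foldl min x ≤ (u.toList.length : Int) := by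
      rcases PySem.List.foldl_min_mem xs x with h | h
      · rw [h]; exact hx
      · exact hmem _ (by rw [hP]; simp [h])
    have hle : xs.foldl min x ≤ x := (PySem.List.foldl_min_le xs x).1
    simp only
    rw [PySem.Str.toList_slice, PySem.Chars.slice_eq_listSlice,
      PySem.List.slice_to u.toList hm.1]
    congr 1
    have h0s : ∀ y ∈ xs, 0 ≤ y := by
      intro y hy
      exact (hmem y (by rw [hP]; simp [hy])).1
    calc ((x :: xs).map Int.toNat).foldl min u.toList.length
        = (xs.map Int.toNat).foldl min (min u.toList.length x.toNat) := by
          simp [List.foldl_cons]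
      _ = min u.toList.length ((xs.map Int.toNat).foldl min x.toNat) := List.foldl_assoc
      _ = min u.toList.length ((xs.foldl min x).toNat) := by rw [pvToNatFold xs x hx.1 h0s]
      _ = (xs.foldl min x).toNat := by omega

-- pairwise safety for the three concrete separator lists
lemma pvPWAll (u : List Char) : List.Pairwise (pvCross u) (pvUGLY.map String.toList) := by
  refine List.Pairwise.cons ?_ (List.Pairwise.cons ?_ ?_)
  · intro b hb
    simp only [List.map_cons, List.map_nil, List.mem_cons, List.not_mem_nil, or_false] at hb
    rcases hb with rfl | rfl | rfl | rfl | rfl | rfl | rfl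
    · exact pvCrossAmp u
    all_goals exact pvCrossOne u _ _ (by decide)
  · intro b hb
    simp only [List.map_cons, List.map_nil, List.mem_cons, List.not_mem_nil, or_false] at hb
    rcases hb with rfl | rfl | rfl | rfl | rfl | rfl
    all_goals exact pvCrossOne u _ _ (by decide)
  · apply pvPWOnes
    intro k hk
    simp only [List.map_cons, List.map_nil, List.mem_cons, List.not_mem_nil, or_false] at hk
    rcases hk with rfl | rfl | rfl | rfl | rfl | rfl <;> decide

lemma pvPWPunc (u : List Char) :
    List.Pairwise (pvCross u) ((PySem.List.slice pvUGLY (some 2) none).map String.toList) := by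
  apply pvPWOnes
  intro k hk
  have : (PySem.List.slice pvUGLY (some 2) none).map String.toList =
      [['?'], ['}'], ['{'], [';'], ['\''], ['"']] := by decide
  rw [this] at hk
  simp only [List.mem_cons, List.not_mem_nil, or_false] at hk
  rcases hk with rfl | rfl | rfl | rfl | rfl | rfl <;> decide

lemma pvPWQuote (u : List Char) :
    List.Pairwise (pvCross u) ((PySem.List.slice pvUGLY none (some 2)).map String.toList) := by
  have : (PySem.List.slice pvUGLY none (some 2)).map String.toList =
      ["&quot;".toList, "&#039;".toList] := by decide
  rw [this]
  exact List.Pairwise.cons (by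
    intro b hb
    simp only [List.mem_cons, List.not_mem_nil, or_false] at hb
    rcases hb with rfl
    exact pvCrossAmp u) (List.Pairwise.cons (by simp) List.Pairwise.nil)

-- ===== VERDICT (by name: the statement is the Claim_ definition above) =====
theorem unhtml_url_spec : Claim_equal_unhtml_url := by
  intro url clean_mode _
  unfold Spec_unhtml_url unhtml_url unhtml_url_alt
  by_cases hall : clean_mode = "all"
  · simp only [hall, if_true, String.reduceEq, if_false]
    exact pvModeEq url pvUGLY (by decide) (pvPWAll url.toList)
  · by_cases hpunc : clean_mode = "punc"
    · simp only [hpunc, if_false, if_true, String.reduceEq]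
      exact pvModeEq url (PySem.List.slice pvUGLY (some 2) none) (by decide) (pvPWPunc url.toList)
    · by_cases hquote : clean_mode = "quote"
      · simp only [hquote, if_false, if_true, String.reduceEq]
        exact pvModeEq url (PySem.List.slice pvUGLY none (some 2)) (by decide) (pvPWQuote url.toList)
      · simp only [hall, hpunc, hquote, if_false]
        rfl
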